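-- pv_equiv track=rewrite | github.com/juanrein/aoc | 2023/day15/day15.py | ascii_hash
-- ===== SOURCE A (Python) =====
-- def ascii_hash(step: str) -> int:
--     value = 0
--     for c in step:
--         d = ord(c)
--
--         value += d
--
--         value = value * 17
--
--         value = value % 256
--
--     return value
-- ===== SOURCE B (Python) =====
-- def ascii_hash(step: str) -> int:
--     n = len(step)
--     return sum(ord(c) * pow(17, n - i, 256) for i, c in enumerate(step)) % 256
-- ===== Notes on version B (the rewrite author's own statement) =====
-- stated objective: alternative
-- what changed: Replaces the mutating running-hash loop with a closed-form expression: the hash equals sum(ord(c_i)*17^(n-i)) mod 256, computed as a single comprehension over enumerate with modular exponentiation, instead of threading an accumulator through every character.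
import Mathlib
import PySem

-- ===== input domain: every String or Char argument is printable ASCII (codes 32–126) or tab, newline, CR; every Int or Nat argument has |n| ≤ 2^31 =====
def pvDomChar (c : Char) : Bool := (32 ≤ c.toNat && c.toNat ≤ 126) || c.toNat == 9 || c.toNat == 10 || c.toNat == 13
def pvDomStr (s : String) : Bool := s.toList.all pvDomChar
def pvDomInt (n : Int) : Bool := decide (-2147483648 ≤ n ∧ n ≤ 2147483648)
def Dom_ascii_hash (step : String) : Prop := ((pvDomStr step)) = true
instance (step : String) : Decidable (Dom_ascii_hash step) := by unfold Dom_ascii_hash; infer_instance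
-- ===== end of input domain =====

-- B replaces A's running-hash loop with a closed-form modular-power sum (d_i·17^(n-i) mod 256); objective: alternative.

-- ===== PORT A =====
def ascii_hash (step : String) : Int :=
  step.toList.foldl (fun value c => PySem.Int.mod ((value + (c.toNat : Int)) * 17) 256) 0

-- ===== PORT B =====
-- pow(17, n - i, 256): the exponent n - i is a nonnegative int for every enumerate index i,
-- so (n - i).toNat is exact here (PySem.Int.powMod takes a Nat exponent).
def ascii_hash_alt (step : String) : Int :=
  let cs := step.toList
  let n : Int := cs.length
  PySem.Int.mod
    (((PySem.List.enumerate cs).map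
        (fun p => (p.2.toNat : Int) * PySem.Int.powMod 17 (n - p.1).toNat 256)).sum)
    256

-- ===== PRECONDITION & SPEC =====
def Spec_ascii_hash (step : String) (out : Int) : Prop := out = ascii_hash_alt step
instance (step : String) (out : Int) : Decidable (Spec_ascii_hash step out) := by unfold Spec_ascii_hash; infer_instance

-- ===== CLAIM (what is proved, stated in full; the proofs are below) =====
def Claim_equal_ascii_hash : Prop := ∀ (step : String), Dom_ascii_hash step → Spec_ascii_hash step (ascii_hash step)

-- ===== LEMMAS AND PROOFS =====

theorem pv_emod_self_modeq (a : Int) : a % 256 ≡ a [ZMOD 256] :=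
  Int.emod_emod_of_dvd a dvd_rfl

-- loop ↔ closed form, generalized over the start index of enumerate and the accumulator
theorem pv_hash_closed_form (l : List Char) :
    ∀ (s v : Int), 0 ≤ v → v < 256 →
      l.foldl (fun value c => PySem.Int.mod ((value + (c.toNat : Int)) * 17) 256) v =
        (v * 17 ^ l.length +
          ((PySem.List.enumerate l s).map
            (fun p => (p.2.toNat : Int) *
              PySem.Int.powMod 17 ((s + l.length) - p.1).toNat 256)).sum) % 256 := by
  induction l with
  | nil =>
      intro s v h0 h1
      simp [PySem.List.enumerate]
      omega
  | cons c t ih =>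
      intro s v h0 h1
      rw [List.foldl_cons, PySem.List.enumerate_cons, List.map_cons, List.sum_cons]
      have hb : (0:Int) < 256 := by norm_num
      have hml : PySem.Int.mod ((v + (c.toNat : Int)) * 17) 256
          = ((v + (c.toNat : Int)) * 17) % 256 := PySem.Int.mod_eq_emod_of_pos hb
      have hv0 : 0 ≤ PySem.Int.mod ((v + (c.toNat : Int)) * 17) 256 := by
        rw [hml]; exact Int.emod_nonneg _ (by norm_num)
      have hv1 : PySem.Int.mod ((v + (c.toNat : Int)) * 17) 256 < 256 := by
        rw [hml]; exact Int.emod_lt_of_pos _ hb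
      rw [ih (s + 1) _ hv0 hv1, hml]
      -- align the two enumerate sums: (s+1)+len t - i = s + len (c::t) - i
      have hsum :
          ((PySem.List.enumerate t (s + 1)).map
            (fun p => (p.2.toNat : Int) *
              PySem.Int.powMod 17 (((s + 1) + t.length) - p.1).toNat 256)).sum =
          ((PySem.List.enumerate t (s + 1)).map
            (fun p => (p.2.toNat : Int) *
              PySem.Int.powMod 17 ((s + (c :: t).length) - p.1).toNat 256)).sum := by
        apply congrArg
        apply List.map_congr_left
        intro p _
        congr 2
        simp [List.length_cons]
        omega
      rw [hsum]
      -- now pure modular arithmetic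
      set S : Int := ((PySem.List.enumerate t (s + 1)).map
            (fun p => (p.2.toNat : Int) *
              PySem.Int.powMod 17 ((s + (c :: t).length) - p.1).toNat 256)).sum with hS
      have hexp : ((s + ((c :: t).length : Int)) - s).toNat = t.length + 1 := by
        simp only [List.length_cons]; omega
      have hpow : PySem.Int.powMod 17 ((s + ((c :: t).length : Int)) - s).toNat 256
          = (17 ^ (t.length + 1)) % 256 := by
        rw [hexp, PySem.Int.powMod, PySem.Int.mod_eq_emod_of_pos hb]
      rw [hpow]
      show (((v + (c.toNat : Int)) * 17) % 256 * 17 ^ t.length + S) % 256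
        = (v * 17 ^ (c :: t).length +
            ((c.toNat : Int) * (17 ^ (t.length + 1) % 256) + S)) % 256
      have h1 : ((v + (c.toNat : Int)) * 17) % 256 * 17 ^ t.length + S
          ≡ (v + (c.toNat : Int)) * 17 * 17 ^ t.length + S [ZMOD 256] :=
        ((pv_emod_self_modeq _).mul_right _).add_right _
      have h2 : v * 17 ^ (c :: t).length + ((c.toNat : Int) * (17 ^ (t.length + 1) % 256) + S)
          ≡ v * 17 ^ (c :: t).length + ((c.toNat : Int) * 17 ^ (t.length + 1) + S) [ZMOD 256] :=
        (((pv_emod_self_modeq _).mul_left _).add_right _).add_left _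
      have h3 : (v + (c.toNat : Int)) * 17 * 17 ^ t.length + S
          = v * 17 ^ (c :: t).length + ((c.toNat : Int) * 17 ^ (t.length + 1) + S) := by
        push_cast [List.length_cons]
        ring
      exact (h1.trans (h3 ▸ (h2.symm))) 

-- ===== VERDICT (by name: the statement is the Claim_ definition above) =====
theorem ascii_hash_spec : Claim_equal_ascii_hash := by
  intro step _
  unfold Spec_ascii_hash ascii_hash ascii_hash_alt
  have hb : (0:Int) < 256 := by norm_num
  rw [PySem.Int.mod_eq_emod_of_pos hb]
  rw [pv_hash_closed_form step.toList 0 0 le_rfl (by norm_num)]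
  simp
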